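-- pv_equiv track=rewrite | github.com/apton-vishnuab/Python | list1.py | sort_last
-- ===== SOURCE A (Python) =====
-- def sort_last(tuples):
--     # Normal bubble sort but the change is it will compare last element from each tuple
--     for i in range(0, len(tuples) - 1):
--         for j in range(len(tuples) - 1):
--             if(tuples[j][-1] > tuples[j + 1][-1]):
--                 temp = tuples[j]
--                 tuples[j] = tuples[j + 1]
--                 tuples[j + 1] = temp
--     return tuples
-- ===== SOURCE B (Python) =====
-- def sort_last(tuples):
--     # In-place insertion sort keyed on the last element; strict '>' keeps it stable.
--     for i in range(1, len(tuples)):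
--         key = tuples[i]
--         j = i - 1
--         while j >= 0 and tuples[j][-1] > key[-1]:
--             tuples[j + 1] = tuples[j]
--             j -= 1
--         tuples[j + 1] = key
--     return tuples
-- ===== Notes on version B (the rewrite author's own statement) =====
-- stated objective: alternative
-- what changed: Replaces the fixed (n-1)-fold full bubble sweeps of adjacent compare-and-swaps by an in-place insertion sort that grows a sorted prefix and shifts each element only as far as needed (early exit per element).
-- outside the precondition, e.g. on sort_last([(1,), ()]): A raises IndexError, B raises IndexError
import Mathlib
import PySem

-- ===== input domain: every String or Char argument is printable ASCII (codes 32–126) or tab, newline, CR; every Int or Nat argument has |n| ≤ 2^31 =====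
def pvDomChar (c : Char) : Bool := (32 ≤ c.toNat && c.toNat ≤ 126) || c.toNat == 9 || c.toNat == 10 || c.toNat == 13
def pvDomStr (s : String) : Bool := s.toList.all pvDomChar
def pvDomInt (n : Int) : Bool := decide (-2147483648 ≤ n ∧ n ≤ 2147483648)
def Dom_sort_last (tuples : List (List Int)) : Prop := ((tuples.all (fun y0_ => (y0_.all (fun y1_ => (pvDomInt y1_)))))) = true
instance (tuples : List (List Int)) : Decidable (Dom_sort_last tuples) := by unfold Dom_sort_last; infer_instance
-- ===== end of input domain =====

-- B replaces A's fixed (n-1)-fold bubble sweep with an insertion sort growing a sorted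
-- prefix; both Pythons mutate the argument list in place identically (same final contents),
-- and the equivalence proved here is about the returned value.

-- key of a tuple: its last element, tuples[j][-1].  Pre_ excludes empty inner tuples
-- (IndexError in Python), so the default 0 is never reached on admitted inputs.
def pvKey (t : List Int) : Int := (PySem.List.pyGet? t (-1)).getD 0

-- ===== PORT A =====
-- one inner loop 'for j in range(len-1)' of adjacent compare-and-swap, as structural recursion:
-- the larger of each adjacent pair is carried forward, exactly as the in-place swaps do
def pvBpass : List (List Int) → List (List Int)
  | [] => []
  | [x] => [x]
  | x :: y :: r => if pvKey y < pvKey x then y :: pvBpass (x :: r) else x :: pvBpass (y :: r)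
termination_by l => l.length

-- outer loop: for i in range(0, len(tuples) - 1): one full inner sweep each iteration
def sort_last (tuples : List (List Int)) : List (List Int) :=
  (List.range (tuples.length - 1)).foldl (fun acc _ => pvBpass acc) tuples

-- ===== PORT B =====
-- the while-loop of Source B: shift the strictly-greater suffix right and drop key in front of it;
-- read left to right this inserts x before the first element with key > key x
def pvIns (x : List Int) : List (List Int) → List (List Int)
  | [] => [x]
  | y :: ys => if pvKey x < pvKey y then x :: y :: ys else y :: pvIns x ys

def sort_last_alt (tuples : List (List Int)) : List (List Int) :=
  tuples.foldl (fun acc x => pvIns x acc) []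

-- ===== PRECONDITION & SPEC =====
-- Pre_ excludes inputs on which Python A raises IndexError: an empty inner tuple, indexed
-- by [-1] as soon as the list has at least two elements (B raises there identically).
def Pre_sort_last (tuples : List (List Int)) : Prop :=
  tuples.length ≤ 1 ∨ ∀ t ∈ tuples, t ≠ []
instance (tuples : List (List Int)) : Decidable (Pre_sort_last tuples) := by
  unfold Pre_sort_last; infer_instance
def pvWitness_sort_last : List (List Int) := [[3, 2], [1], [0, 5]]

def Spec_sort_last (tuples : List (List Int)) (out : List (List Int)) : Prop := out = sort_last_alt tuples
instance (tuples : List (List Int)) (out : List (List Int)) : Decidable (Spec_sort_last tuples out) := by unfold Spec_sort_last; infer_instance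

-- ===== CLAIM (what is proved, stated in full; the proofs are below) =====
def Claim_equal_sort_last : Prop := ∀ (tuples : List (List Int)), Dom_sort_last tuples → Pre_sort_last tuples → Spec_sort_last tuples (sort_last tuples)

-- ===== LEMMAS AND PROOFS =====

def pvSorted (l : List (List Int)) : Prop := l.Pairwise (fun a b => pvKey a ≤ pvKey b)

def pvFilt (k : Int) (l : List (List Int)) : List (List Int) := l.filter (fun x => pvKey x = k)

-- uniqueness of a stable sort: two key-sorted lists with the same per-key filters are equal
theorem pv_filt_mem {k : Int} {a : List Int} {l : List (List Int)}
    (h : a ∈ pvFilt k l) : a ∈ l ∧ pvKey a = k := by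
  simp [pvFilt, List.mem_filter] at h; exact ⟨h.1, h.2⟩

theorem pv_unique : ∀ (l₁ l₂ : List (List Int)), pvSorted l₁ → pvSorted l₂ →
    (∀ k, pvFilt k l₁ = pvFilt k l₂) → l₁ = l₂ := by
  intro l₁
  induction l₁ with
  | nil =>
    intro l₂ _ _ hf
    cases l₂ with
    | nil => rfl
    | cons b t₂ =>
      have := hf (pvKey b)
      simp [pvFilt] at this
  | cons a t₁ ih =>
    intro l₂ hs₁ hs₂ hf
    cases l₂ with
    | nil =>
      have := hf (pvKey a)
      simp [pvFilt] at this
    | cons b t₂ =>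
      have ha2 : a ∈ b :: t₂ := by
        have : a ∈ pvFilt (pvKey a) (b :: t₂) := by
          rw [← hf]; simp [pvFilt]
        exact (pv_filt_mem this).1
      have hb1 : b ∈ a :: t₁ := by
        have : b ∈ pvFilt (pvKey b) (a :: t₁) := by
          rw [hf]; simp [pvFilt]
        exact (pv_filt_mem this).1
      have hba : pvKey b ≤ pvKey a := by
        rcases (List.mem_cons).1 ha2 with h | h
        · simp [h]
        · exact (List.pairwise_cons.1 hs₂).1 a h
      have hab : pvKey a ≤ pvKey b := by
        rcases (List.mem_cons).1 hb1 with h | h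
        · simp [h]
        · exact (List.pairwise_cons.1 hs₁).1 b h
      have hk : pvKey a = pvKey b := le_antisymm hab hba
      have h1 : pvFilt (pvKey a) (a :: t₁) = a :: pvFilt (pvKey a) t₁ := by simp [pvFilt]
      have h2 : pvFilt (pvKey a) (b :: t₂) = b :: pvFilt (pvKey a) t₂ := by simp [pvFilt, hk.symm]
      have hfa := hf (pvKey a)
      rw [h1, h2] at hfa
      injection hfa with hab' hft
      subst hab'
      have htail : ∀ k, pvFilt k t₁ = pvFilt k t₂ := by
        intro k
        by_cases hka : k = pvKey a
        · subst hka; exact hft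
        · have hne : ¬ pvKey a = k := fun h => hka h.symm
          have := hf k
          simpa [pvFilt, hne] using this
      exact congrArg (a :: ·) (ih t₂ (List.pairwise_cons.1 hs₁).2 (List.pairwise_cons.1 hs₂).2 htail)

-- ---- bubble pass facts ----
theorem pvBpass_perm : ∀ l, (pvBpass l).Perm l := by
  intro l
  fun_induction pvBpass l with
  | case1 => simp
  | case2 => simp
  | case3 x y r h ih =>
    exact ((ih.cons y).trans (List.Perm.swap x y r))
  | case4 x y r h ih =>
    exact ih.cons x

theorem pvBpass_filt : ∀ k l, pvFilt k (pvBpass l) = pvFilt k l := by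
  intro k l
  fun_induction pvBpass l with
  | case1 => rfl
  | case2 => rfl
  | case3 x y r h ih =>
    by_cases hx : pvKey x = k
    · have hy : ¬ pvKey y = k := by intro hy; rw [hx, ← hy] at h; omega
      simp [pvFilt, hx, hy] at ih ⊢; exact ih
    · by_cases hy : pvKey y = k
      · simp [pvFilt, hx, hy] at ih ⊢; exact ih
      · simp [pvFilt, hx, hy] at ih ⊢; exact ih
  | case4 x y r h ih =>
    by_cases hx : pvKey x = k <;> by_cases hy : pvKey y = k <;>
      simp [pvFilt, hx, hy] at ih ⊢ <;> exact ih

theorem pvBpass_snoc : ∀ (x : List Int) (l : List (List Int)),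
    ∃ f m, pvBpass (x :: l) = f ++ [m] ∧ (∀ a ∈ f, pvKey a ≤ pvKey m) := by
  intro x l
  induction l generalizing x with
  | nil => exact ⟨[], x, by simp [pvBpass], by simp⟩
  | cons y r ih =>
    by_cases h : pvKey y < pvKey x
    · obtain ⟨f, m, heq, hle⟩ := ih x
      refine ⟨y :: f, m, by simp [pvBpass, h, heq], ?_⟩
      intro a ha
      rcases List.mem_cons.1 ha with rfl | ha
      · have hx : x ∈ f ++ [m] := by
          rw [← heq]; exact (pvBpass_perm _).mem_iff.2 (by simp)
        rcases List.mem_append.1 hx with hx | hx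
        · exact le_of_lt (lt_of_lt_of_le h (hle x hx))
        · simp at hx; exact le_of_lt (hx ▸ h)
      · exact hle a ha
    · obtain ⟨f, m, heq, hle⟩ := ih y
      refine ⟨x :: f, m, by simp [pvBpass, h, heq], ?_⟩
      intro a ha
      rcases List.mem_cons.1 ha with rfl | ha
      · have hy : y ∈ f ++ [m] := by
          rw [← heq]; exact (pvBpass_perm _).mem_iff.2 (by simp)
        rcases List.mem_append.1 hy with hy | hy
        · exact le_trans (not_lt.1 h) (hle y hy)
        · simp at hy; exact hy ▸ (not_lt.1 h)
      · exact hle a ha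

theorem pvBpass_append_max : ∀ (f : List (List Int)) (m : List Int),
    (∀ a ∈ f, pvKey a ≤ pvKey m) → pvBpass (f ++ [m]) = pvBpass f ++ [m] := by
  intro f
  fun_induction pvBpass f with
  | case1 => intro m _; simp [pvBpass]
  | case2 x =>
    intro m hle
    have : ¬ pvKey m < pvKey x := not_lt.2 (hle x (by simp))
    simp [pvBpass, this]
  | case3 x y r h ih =>
    intro m hle
    have e1 : pvBpass (x :: y :: (r ++ [m])) = y :: pvBpass (x :: (r ++ [m])) := by
      simp [pvBpass, h]
    have e3 := ih m (fun a ha => hle a (by rcases List.mem_cons.1 ha with rfl | ha <;> simp [ha]))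
    simp only [List.cons_append] at e3 ⊢
    rw [e1, e3]
  | case4 x y r h ih =>
    intro m hle
    have e1 : pvBpass (x :: y :: (r ++ [m])) = x :: pvBpass (y :: (r ++ [m])) := by
      simp [pvBpass, h]
    have e3 := ih m (fun a ha => hle a (by rcases List.mem_cons.1 ha with rfl | ha <;> simp [ha]))
    simp only [List.cons_append] at e3 ⊢
    rw [e1, e3]

theorem pvBpass_iter_append_max : ∀ (n : Nat) (f : List (List Int)) (m : List Int),
    (∀ a ∈ f, pvKey a ≤ pvKey m) → pvBpass^[n] (f ++ [m]) = pvBpass^[n] f ++ [m] := by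
  intro n
  induction n with
  | zero => intro f m _; rfl
  | succ n ih =>
    intro f m hle
    rw [Function.iterate_succ_apply, Function.iterate_succ_apply,
      pvBpass_append_max f m hle,
      ih (pvBpass f) m (fun a ha => hle a ((pvBpass_perm f).subset ha))]

theorem pvBpass_iter_perm : ∀ (n : Nat) (l : List (List Int)), (pvBpass^[n] l).Perm l := by
  intro n
  induction n with
  | zero => intro l; rfl
  | succ n ih => intro l; rw [Function.iterate_succ_apply]; exact (ih _).trans (pvBpass_perm l)

theorem pvBpass_iter_sorted : ∀ (n : Nat) (l : List (List Int)),
    l.length ≤ n + 1 → pvSorted (pvBpass^[n] l) := by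
  intro n
  induction n with
  | zero =>
    intro l hl
    match l, hl with
    | [], _ => simp [pvSorted]
    | [x], _ => simp [pvSorted]
  | succ n ih =>
    intro l hl
    cases l with
    | nil =>
      rw [show pvBpass^[n+1] ([] : List (List Int)) = [] from (pvBpass_iter_perm (n+1) []).eq_nil]
      simp [pvSorted]
    | cons x t =>
      obtain ⟨f, m, heq, hle⟩ := pvBpass_snoc x t
      have hlen : f.length = t.length := by
        have := (pvBpass_perm (x :: t)).length_eq
        rw [heq] at this; simp at this; omega
      rw [Function.iterate_succ_apply, heq, pvBpass_iter_append_max n f m hle]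
      have hsf : pvSorted (pvBpass^[n] f) := ih f (by simp at hl; omega)
      unfold pvSorted
      rw [List.pairwise_append]
      refine ⟨hsf, by simp, ?_⟩
      intro a ha b hb
      simp at hb
      exact hb ▸ hle a ((pvBpass_iter_perm n f).subset ha)

theorem pvBpass_iter_filt : ∀ (n : Nat) (k : Int) (l : List (List Int)),
    pvFilt k (pvBpass^[n] l) = pvFilt k l := by
  intro n
  induction n with
  | zero => intro k l; rfl
  | succ n ih => intro k l; rw [Function.iterate_succ_apply, ih, pvBpass_filt]

theorem pv_sortA_eq_iter (tuples : List (List Int)) :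
    sort_last tuples = pvBpass^[tuples.length - 1] tuples := by
  unfold sort_last
  generalize tuples.length - 1 = n
  induction n generalizing tuples with
  | zero => rfl
  | succ n ih =>
    rw [List.range_succ, List.foldl_append, ih, Function.iterate_succ_apply']
    simp

-- ---- insertion sort facts ----
theorem pvIns_mem {a x : List Int} : ∀ {l : List (List Int)}, a ∈ pvIns x l → a = x ∨ a ∈ l := by
  intro l
  fun_induction pvIns x l with
  | case1 => simp
  | case2 y ys h => intro ha; simpa using ha
  | case3 y ys h ih =>
    intro ha
    rcases List.mem_cons.1 ha with rfl | ha
    · right; simp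
    · rcases ih ha with h' | h'
      · exact Or.inl h'
      · right; simp [h']

theorem pvIns_sorted {x : List Int} : ∀ {l : List (List Int)}, pvSorted l → pvSorted (pvIns x l) := by
  intro l
  fun_induction pvIns x l with
  | case1 => intro _; simp [pvSorted]
  | case2 y ys h =>
    intro hs
    unfold pvSorted at hs ⊢
    rw [List.pairwise_cons]
    refine ⟨?_, hs⟩
    intro b hb
    rcases List.mem_cons.1 hb with rfl | hb
    · exact le_of_lt h
    · exact le_trans (le_of_lt h) ((List.pairwise_cons.1 hs).1 b hb)
  | case3 y ys h ih =>
    intro hs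
    unfold pvSorted at hs ⊢
    rw [List.pairwise_cons]
    refine ⟨?_, ih (List.pairwise_cons.1 hs).2⟩
    intro b hb
    rcases pvIns_mem hb with rfl | hb
    · exact not_lt.1 h
    · exact (List.pairwise_cons.1 hs).1 b hb

theorem pvIns_filt (k : Int) (x : List Int) : ∀ (l : List (List Int)), pvSorted l →
    pvFilt k (pvIns x l) = pvFilt k l ++ (if pvKey x = k then [x] else []) := by
  intro l
  fun_induction pvIns x l with
  | case1 => intro _; by_cases h : pvKey x = k <;> simp [pvFilt, h]
  | case2 y ys h =>
    intro hs
    by_cases hx : pvKey x = k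
    · have hy : ∀ b ∈ y :: ys, ¬ pvKey b = k := by
        intro b hb hbk
        rcases List.mem_cons.1 hb with rfl | hb
        · rw [hbk, ← hx] at h; omega
        · have := (List.pairwise_cons.1 hs).1 b hb
          rw [hbk, ← hx] at this; omega
      have hnil : List.filter (fun b => decide (pvKey b = k)) (y :: ys) = [] := by
        rw [List.filter_eq_nil_iff]; intro b hb; simpa using hy b hb
      simp [pvFilt, hx, hnil]
    · simp [pvFilt, hx]
  | case3 y ys h ih =>
    intro hs
    have ih' := ih (List.pairwise_cons.1 hs).2
    simp only [pvFilt] at ih' ⊢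
    by_cases hy : pvKey y = k <;> simp [hy, ih']

theorem pv_sortB_invariant : ∀ (l acc : List (List Int)), pvSorted acc →
    pvSorted (l.foldl (fun acc x => pvIns x acc) acc) ∧
    (∀ k, pvFilt k (l.foldl (fun acc x => pvIns x acc) acc) = pvFilt k acc ++ pvFilt k l) := by
  intro l
  induction l with
  | nil => intro acc hs; exact ⟨hs, fun k => by simp [pvFilt]⟩
  | cons x t ih =>
    intro acc hs
    obtain ⟨h1, h2⟩ := ih (pvIns x acc) (pvIns_sorted hs)
    refine ⟨h1, ?_⟩
    intro k
    rw [List.foldl_cons] at *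
    rw [h2 k, pvIns_filt k x acc hs]
    by_cases hx : pvKey x = k <;> simp [pvFilt, hx]

-- ===== VERDICT (by name: the statement is the Claim_ definition above) =====
theorem sort_last_spec : Claim_equal_sort_last := by
  intro tuples _ _
  unfold Spec_sort_last sort_last_alt
  rw [pv_sortA_eq_iter]
  have hsA := pvBpass_iter_sorted (tuples.length - 1) tuples (by omega)
  obtain ⟨hsB, hfB⟩ := pv_sortB_invariant tuples [] (by simp [pvSorted])
  refine pv_unique _ _ hsA hsB ?_
  intro k
  rw [pvBpass_iter_filt, hfB k]
  simp [pvFilt]
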